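-- pv_equiv track=rewrite | github.com/Kimuksung/codewars-programmers | 로또.py | solution
-- ===== SOURCE A (Python) =====
-- def solution(lottos, win_nums):
--     lottos = list ( filter(lambda x : x!= 0 , lottos) )
--     rank = [6 ,6 ,5,4,3,2,1]
--     zero_cnt = 6 - len(lottos)
--     cnt = 0
--     for data in win_nums :
--         if data in lottos :
--             cnt += 1
--     answer = [ rank[zero_cnt + cnt] , rank[cnt] ]
--     return answer
-- ===== SOURCE B (Python) =====
-- def solution(lottos, win_nums):
--     def merge_count(ws, ps):
--         # two-pointer count over two sorted lists: how many entries of ws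
--         # (with multiplicity) occur in the strictly increasing ps
--         if not ws or not ps:
--             return 0
--         if ws[0] < ps[0]:
--             return merge_count(ws[1:], ps)
--         if ws[0] > ps[0]:
--             return merge_count(ws, ps[1:])
--         return 1 + merge_count(ws[1:], ps)
--     picks = sorted(set(lottos) - {0})
--     cnt = merge_count(sorted(win_nums), picks)
--     zero_cnt = 6 - (len(lottos) - lottos.count(0))
--     return [min(6, 7 - (zero_cnt + cnt)), min(6, 7 - cnt)]
-- ===== Notes on version B (the rewrite author's own statement) =====
-- stated objective: alternative
-- what changed: Replaces A's per-win-num linear membership scan and hand-built rank table by sorting both lists and counting matches with a recursive two-pointer merge, plus the closed-form rank min(6, 7 - x).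
-- intended difference: On inputs where the number of nonzero lottos exceeds 6 + matches by 1..5 (only possible for over-length tickets), A's negative index wraps around its rank table and returns an accidental rank 5..1, while B's clamp returns the intended no-prize rank 6. — e.g. on solution([1, 2, 3, 4, 5, 6, 7, 8], []): A returns [2, 6], B returns [6, 6]
import Mathlib
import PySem

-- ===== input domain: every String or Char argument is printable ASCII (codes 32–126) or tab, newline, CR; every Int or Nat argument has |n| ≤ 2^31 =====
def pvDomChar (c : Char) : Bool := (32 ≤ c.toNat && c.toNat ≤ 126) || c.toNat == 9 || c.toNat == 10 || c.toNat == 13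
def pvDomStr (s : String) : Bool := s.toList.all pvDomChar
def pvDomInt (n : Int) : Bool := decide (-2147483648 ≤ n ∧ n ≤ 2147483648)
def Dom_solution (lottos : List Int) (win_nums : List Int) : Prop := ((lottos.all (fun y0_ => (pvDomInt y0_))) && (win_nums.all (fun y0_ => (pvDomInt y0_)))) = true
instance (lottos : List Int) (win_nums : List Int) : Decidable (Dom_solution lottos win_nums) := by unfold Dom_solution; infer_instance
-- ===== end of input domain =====

-- B sorts both lists and counts matches by a recursive two-pointer merge, and replaces the
-- hand-built rank table by the closed form min(6, 7-x) (alternative algorithm; on over-length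
-- tickets where A's negative index wraps, B returns the intended rank 6 — see D_solution).

-- ===== PORT A =====
def solution (lottos : List Int) (win_nums : List Int) : List Int :=
  let lottos' := lottos.filter (fun x => x != 0)
  let rank : List Int := [6, 6, 5, 4, 3, 2, 1]
  let zero_cnt : Int := 6 - (lottos'.length : Int)
  let cnt : Int := win_nums.foldl (fun c data => if lottos'.contains data then c + 1 else c) 0
  -- rank[zero_cnt+cnt] / rank[cnt]: Python indexing; out-of-range (IndexError) is excluded by Pre_solution
  [PySem.List.pyGetD rank (zero_cnt + cnt) 0, PySem.List.pyGetD rank cnt 0]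

-- ===== PORT B =====
-- two-pointer merge count over two sorted lists (Source B's merge_count, step for step;
-- the fuel argument only makes the recursion structural and is always sufficient)
def mergeCountGo : Nat → List Int → List Int → Int
  | 0, _, _ => 0
  | _ + 1, [], _ => 0
  | _ + 1, _ :: _, [] => 0
  | n + 1, w :: ws, p :: ps =>
      if w < p then mergeCountGo n ws (p :: ps)
      else if w > p then mergeCountGo n (w :: ws) ps
      else 1 + mergeCountGo n ws (p :: ps)

def mergeCount (ws ps : List Int) : Int := mergeCountGo (ws.length + ps.length) ws ps

def solution_alt (lottos : List Int) (win_nums : List Int) : List Int :=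
  let picks := PySem.List.sorted (PySem.Set.diff (PySem.Set.ofList lottos) [0]) (fun x => x) false
  let cnt : Int := mergeCount (PySem.List.sorted win_nums (fun x => x) false) picks
  let zero_cnt : Int := 6 - ((lottos.length : Int) - (PySem.List.count lottos 0 : Int))
  [min 6 (7 - (zero_cnt + cnt)), min 6 (7 - cnt)]

-- ===== PRECONDITION & SPEC =====
-- Pre_solution is exactly the set of inputs where A's two rank-table indexes are in Python range
-- [-7, 6], i.e. exactly where the Python A returns instead of raising IndexError.
def Pre_solution (lottos : List Int) (win_nums : List Int) : Prop :=
  (win_nums.filter lottos.contains).countP (· != 0) ≤ 6 ∧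
  (win_nums.filter lottos.contains).countP (· != 0) ≤ lottos.countP (· != 0) ∧
  lottos.countP (· != 0) ≤ (win_nums.filter lottos.contains).countP (· != 0) + 13
instance (lottos : List Int) (win_nums : List Int) : Decidable (Pre_solution lottos win_nums) := by unfold Pre_solution; infer_instance
def pvWitness_solution : List Int × List Int := ([0, 0, 0, 0, 0, 0], [1, 2, 3, 4, 5, 6])

-- On inputs where the nonzero lottos outnumber 6 + matches by 1..5, A's negative index wraps
-- around the rank table and returns an accidental rank 5..1, while B's clamp returns 6, the
-- intended 'no prize' rank for a count that cannot win.
def D_solution (lottos : List Int) (win_nums : List Int) : Prop :=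
  (win_nums.filter lottos.contains).countP (· != 0) + 7 ≤ lottos.countP (· != 0) ∧
  lottos.countP (· != 0) ≤ (win_nums.filter lottos.contains).countP (· != 0) + 11
instance (lottos : List Int) (win_nums : List Int) : Decidable (D_solution lottos win_nums) := by unfold D_solution; infer_instance

def Spec_solution (lottos : List Int) (win_nums : List Int) (out : List Int) : Prop := ¬ D_solution lottos win_nums → out = solution_alt lottos win_nums
instance (lottos : List Int) (win_nums : List Int) (out : List Int) : Decidable (Spec_solution lottos win_nums out) := by unfold Spec_solution; infer_instance

def pvDiffWitness_solution : List Int × List Int := ([1, 2, 3, 4, 5, 6, 7, 8], [])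
def pvDiffWitnessOut_solution : (List Int) × (List Int) := ([2, 6], [6, 6])

-- ===== CLAIM (what is proved, stated in full; the proofs are below) =====
def Claim_unchanged_solution : Prop := ∀ (lottos : List Int) (win_nums : List Int), Dom_solution lottos win_nums → Pre_solution lottos win_nums → Spec_solution lottos win_nums (solution lottos win_nums)
def Claim_changed_solution : Prop := Dom_solution (pvDiffWitness_solution.1) (pvDiffWitness_solution.2) ∧ Pre_solution (pvDiffWitness_solution.1) (pvDiffWitness_solution.2) ∧ D_solution (pvDiffWitness_solution.1) (pvDiffWitness_solution.2) ∧ solution (pvDiffWitness_solution.1) (pvDiffWitness_solution.2) = pvDiffWitnessOut_solution.1 ∧ solution_alt (pvDiffWitness_solution.1) (pvDiffWitness_solution.2) = pvDiffWitnessOut_solution.2 ∧ pvDiffWitnessOut_solution.1 ≠ pvDiffWitnessOut_solution.2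
def Claim_exact_solution : Prop := ∀ (lottos : List Int) (win_nums : List Int), Dom_solution lottos win_nums → Pre_solution lottos win_nums → D_solution lottos win_nums → solution lottos win_nums ≠ solution_alt lottos win_nums

-- ===== LEMMAS AND PROOFS =====

-- proof-only abbreviations for the two counts appearing in Pre_/D_
def nzI (lottos : List Int) : Int := ((lottos.countP (· != 0)) : Int)
def cntI (lottos win_nums : List Int) : Int := (((win_nums.filter lottos.contains).countP (· != 0)) : Int)

-- A's counting loop is the length of a filter
theorem foldl_if_count (p : Int → Bool) (l : List Int) (n : Int) :
    l.foldl (fun c d => if p d then c + 1 else c) n = n + ((l.filter p).length : Int) := by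
  induction l generalizing n with
  | nil => simp
  | cons x t ih => by_cases h : p x <;> simp [h, ih] <;> omega

theorem memA_pred (lottos : List Int) (d : Int) :
    (lottos.filter (fun x => x != 0)).contains d = (lottos.contains d && d != 0) := by
  by_cases h : d = 0 <;> by_cases h2 : d ∈ lottos <;> simp [List.mem_filter, Bool.and_comm, h, h2]

theorem nzI_eq (lottos : List Int) :
    nzI lottos = ((lottos.filter (fun x => x != 0)).length : Int) := by
  unfold nzI
  rw [List.countP_eq_length_filter]

theorem cntI_eq (lottos win_nums : List Int) :
    cntI lottos win_nums = ((win_nums.filter (fun d => lottos.contains d && d != 0)).length : Int) := by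
  unfold cntI
  rw [List.countP_eq_length_filter, List.filter_filter]
  norm_num
  exact congrArg _ (List.filter_congr (fun d _ => by by_cases h : d = 0 <;> by_cases h2 : d ∈ lottos <;> simp [h, h2]))

theorem solA_eq (lottos win_nums : List Int) :
    solution lottos win_nums =
      [PySem.List.pyGetD [6, 6, 5, 4, 3, 2, 1] (6 - nzI lottos + cntI lottos win_nums) 0,
       PySem.List.pyGetD [6, 6, 5, 4, 3, 2, 1] (cntI lottos win_nums) 0] := by
  show [PySem.List.pyGetD _ (6 - _ + List.foldl _ 0 win_nums) 0, PySem.List.pyGetD _ (List.foldl _ 0 win_nums) 0] = _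
  have hf : win_nums.foldl (fun c data => if (lottos.filter (fun x => x != 0)).contains data then c + 1 else c) 0
      = cntI lottos win_nums := by
    rw [foldl_if_count, cntI_eq, List.filter_congr (fun d _ => memA_pred lottos d)]
    simp
  rw [hf, nzI_eq]

-- the merge counts exactly the entries of the (≤-sorted) ws lying in the (<-sorted) ps
theorem mergeCountGo_eq (n : Nat) (ws ps : List Int) (hn : ws.length + ps.length ≤ n)
    (hw : ws.Pairwise (· ≤ ·)) (hp : ps.Pairwise (· < ·)) :
    mergeCountGo n ws ps = ((ws.filter (fun x => ps.contains x)).length : Int) := by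
  induction n generalizing ws ps with
  | zero =>
    have hws : ws = [] := by cases ws <;> simp_all
    subst hws
    simp [mergeCountGo]
  | succ n ih =>
    match ws, ps with
    | [], ps => simp [mergeCountGo]
    | w :: ws, [] => simp [mergeCountGo]
    | w :: ws, p :: ps =>
      simp only [mergeCountGo]
      by_cases h1 : w < p
      · rw [if_pos h1, ih ws (p :: ps) (by simp at hn ⊢; omega) hw.tail hp]
        have hnot : ¬(w = p ∨ w ∈ ps) := by
          rintro (rfl | hmem)
          · omega
          · have := (List.pairwise_cons.mp hp).1 w hmem
            omega
        simp [List.filter_cons, hnot]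
      · by_cases h2 : w > p
        · rw [if_neg h1, if_pos h2, ih (w :: ws) ps (by simp at hn ⊢; omega) hw hp.tail]
          have hcongr : ∀ x ∈ w :: ws, ((p :: ps).contains x) = (ps.contains x) := by
            intro x hx
            have hwx : w ≤ x := by
              rcases List.mem_cons.mp hx with rfl | hx'
              · exact le_refl _
              · exact (List.pairwise_cons.mp hw).1 x hx'
            have hne : x ≠ p := by omega
            simp [hne]
          rw [List.filter_congr hcongr]
        · have hweq : w = p := by omega
          rw [if_neg h1, if_neg h2, ih ws (p :: ps) (by simp at hn ⊢; omega) hw.tail hp]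
          have hmem : w = p ∨ w ∈ ps := Or.inl hweq
          simp [hmem]
          omega

theorem mergeCount_eq (ws ps : List Int) (hw : ws.Pairwise (· ≤ ·)) (hp : ps.Pairwise (· < ·)) :
    mergeCount ws ps = ((ws.filter (fun x => ps.contains x)).length : Int) :=
  mergeCountGo_eq _ ws ps le_rfl hw hp

theorem countP_ne_add_count (l : List Int) : l.countP (· != 0) + l.count 0 = l.length := by
  induction l with
  | nil => rfl
  | cons x t ih =>
    by_cases h : x = 0
    · subst h; simp; omega
    · simp [h]; omega

-- picks = sorted(set(lottos) - {0}) is strictly increasing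
theorem picks_pairwise_lt (lottos : List Int) :
    (PySem.List.sorted (PySem.Set.diff (PySem.Set.ofList lottos) [0]) (fun x => x) false).Pairwise (· < ·) := by
  have hle := PySem.List.sorted_pairwise (xs := PySem.Set.diff (PySem.Set.ofList lottos) [0]) (key := fun x => x)
  have hnd : (PySem.List.sorted (PySem.Set.diff (PySem.Set.ofList lottos) [0]) (fun x => x) false).Nodup :=
    (PySem.List.sorted_perm _ _ _).nodup_iff.mpr
      (PySem.Set.nodup_diff _ _ (PySem.Set.nodup_ofList lottos))
  exact (hle.and hnd).imp (fun h => lt_of_le_of_ne h.1 h.2)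

theorem mem_picks (lottos : List Int) (x : Int) :
    (PySem.List.sorted (PySem.Set.diff (PySem.Set.ofList lottos) [0]) (fun x => x) false).contains x
      = (lottos.contains x && x != 0) := by
  by_cases h : x = 0 <;> by_cases h2 : x ∈ lottos <;>
    simp [PySem.List.mem_sorted, PySem.Set.mem_diff, PySem.Set.mem_ofList, h, h2]

theorem solB_eq (lottos win_nums : List Int) :
    solution_alt lottos win_nums =
      [min 6 (7 - (6 - nzI lottos + cntI lottos win_nums)), min 6 (7 - cntI lottos win_nums)] := by
  show [min 6 (7 - (6 - _ + mergeCount _ _)), min 6 (7 - mergeCount _ _)] = _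
  have hcnt : mergeCount (PySem.List.sorted win_nums (fun x => x) false)
      (PySem.List.sorted (PySem.Set.diff (PySem.Set.ofList lottos) [0]) (fun x => x) false)
      = cntI lottos win_nums := by
    rw [mergeCount_eq _ _ (PySem.List.sorted_pairwise win_nums (fun x => x)) (picks_pairwise_lt lottos)]
    rw [List.filter_congr (fun x _ => mem_picks lottos x)]
    rw [cntI_eq]
    have hperm : (PySem.List.sorted win_nums (fun x => x) false).Perm win_nums :=
      PySem.List.sorted_perm _ _ _
    rw [(hperm.filter _).length_eq]
  rw [hcnt]
  have hcount := countP_ne_add_count lottos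
  have hz : (6 : Int) - ((lottos.length : Int) - (PySem.List.count lottos 0 : Int)) = 6 - nzI lottos := by
    rw [PySem.List.count_eq]
    unfold nzI
    omega
  rw [hz]

theorem rank_closed (i : Int) (h1 : -7 ≤ i) (h2 : i ≤ 6) (h3 : i < -5 ∨ 0 ≤ i) :
    PySem.List.pyGetD [6, 6, 5, 4, 3, 2, 1] i 0 = min 6 (7 - i) := by
  interval_cases i <;> first | (exfalso; omega) | decide

theorem rank_wrap (i : Int) (h1 : -5 ≤ i) (h2 : i ≤ -1) :
    PySem.List.pyGetD [6, 6, 5, 4, 3, 2, 1] i 0 ≠ min 6 (7 - i) := by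
  interval_cases i <;> decide

theorem cntI_nonneg (lottos win_nums : List Int) : 0 ≤ cntI lottos win_nums := by
  unfold cntI; positivity

-- ===== VERDICT (by name: the statement is the Claim_ definition above) =====
theorem solution_spec : Claim_unchanged_solution := by
  intro lottos win_nums _ hpre hnd
  unfold Pre_solution at hpre
  unfold D_solution at hnd
  obtain ⟨h1, h2, h3⟩ := hpre
  have hc0 := cntI_nonneg lottos win_nums
  rw [solA_eq, solB_eq]
  have hnd' : 6 - nzI lottos + cntI lottos win_nums < -5 ∨ 0 ≤ 6 - nzI lottos + cntI lottos win_nums := by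
    unfold nzI cntI at *
    omega
  rw [rank_closed _ (by unfold nzI cntI at *; omega) (by unfold nzI cntI at *; omega) hnd',
      rank_closed _ (by unfold nzI cntI at *; omega) (by unfold nzI cntI at *; omega) (Or.inr hc0)]

theorem solution_changed : Claim_changed_solution := by
  unfold Claim_changed_solution; decide

theorem solution_tight : Claim_exact_solution := by
  intro lottos win_nums _ hpre hd
  unfold Pre_solution at hpre
  unfold D_solution at hd
  rw [solA_eq, solB_eq]
  intro h
  have h0 := List.head_eq_of_cons_eq h
  exact rank_wrap _ (by unfold nzI cntI at *; omega) (by unfold nzI cntI at *; omega) h0
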